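-- pv_equiv track=rewrite | github.com/MrBrantCode/unitest_baseline | mut_generate/mist_train_taco/taco_4989/solution.py | count_restorable_arrays
-- ===== SOURCE A (Python) =====
-- def count_restorable_arrays(n, l, r):
--     MOD = 10**9 + 7
--
--     # Adjust l to be 0-based for easier calculations
--     l -= 1
--
--     # Calculate the number of elements in each remainder class [0, 1, 2] for l and r
--     lrem = [0, 0, 0]
--     rrem = [0, 0, 0]
--
--     if l % 3 == 0:
--         lrem[0] = l // 3
--         lrem[1] = l // 3
--         lrem[2] = l // 3
--     elif l % 3 == 1:
--         lrem[0] = l // 3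
--         lrem[1] = l // 3 + 1
--         lrem[2] = l // 3
--     else:
--         lrem[0] = l // 3
--         lrem[1] = l // 3 + 1
--         lrem[2] = l // 3 + 1
--
--     if r % 3 == 0:
--         rrem[0] = r // 3
--         rrem[1] = r // 3
--         rrem[2] = r // 3
--     elif r % 3 == 1:
--         rrem[0] = r // 3
--         rrem[1] = r // 3 + 1
--         rrem[2] = r // 3
--     else:
--         rrem[0] = r // 3
--         rrem[1] = r // 3 + 1
--         rrem[2] = r // 3 + 1
--
--     # Calculate the number of elements in each remainder class [0, 1, 2] in the range [l, r]
--     rem = [rrem[i] - lrem[i] for i in range(3)]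
--
--     # Initialize the dynamic programming table
--     dp = [[0 for _ in range(n)] for _ in range(3)]
--     dp[0][0] = rem[0]
--     dp[1][0] = rem[1]
--     dp[2][0] = rem[2]
--
--     # Fill the dynamic programming table
--     for i in range(1, n):
--         dp[0][i] = (dp[0][i - 1] * rem[0] + dp[1][i - 1] * rem[2] + dp[2][i - 1] * rem[1]) % MOD
--         dp[1][i] = (dp[1][i - 1] * rem[0] + dp[2][i - 1] * rem[2] + dp[0][i - 1] * rem[1]) % MOD
--         dp[2][i] = (dp[2][i - 1] * rem[0] + dp[1][i - 1] * rem[1] + dp[0][i - 1] * rem[2]) % MOD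
--
--     # The answer is the number of ways to get a sum divisible by 3 for an array of size n
--     return dp[0][n - 1]
-- ===== SOURCE B (Python) =====
-- def count_restorable_arrays(n, l, r):
--     MOD = 10**9 + 7
--     # rem[j] = count of x in [l, r] with x % 3 == j, via one floor-division formula each
--     rem = [(r + c) // 3 - (l - 1 + c) // 3 for c in (0, 2, 1)]
--     a, b, c = rem
--     M = ((a, c, b), (b, a, c), (c, b, a))
--
--     def mul(X, Y):
--         return tuple(
--             tuple(sum(X[i][k] * Y[k][j] for k in range(3)) % MOD for j in range(3))
--             for i in range(3)
--         )
--
--     # R = M ** (n - 1) by binary exponentiation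
--     R = ((1, 0, 0), (0, 1, 0), (0, 0, 1))
--     P = M
--     e = n - 1
--     while e > 0:
--         if e & 1:
--             R = mul(R, P)
--         P = mul(P, P)
--         e >>= 1
--     return (R[0][0] * a + R[0][1] * b + R[0][2] * c) % MOD
-- ===== Notes on version B (the rewrite author's own statement) =====
-- stated objective: faster
-- what changed: Replaces the O(n) linear DP over remainder classes by binary exponentiation of the fixed 3x3 circulant transition matrix (and the 6-way case analysis for the class counts by one floor-division formula per class), reducing the work to O(log n) matrix multiplications.
-- intended difference: For n = 1 when the count of multiples of 3 in [l, r] is negative (r < l) or >= 10^9+7, A returns that raw unreduced count (e.g. -1) because its DP seed is never taken mod 10^9+7, while B returns the canonical residue in [0, 10^9+7), which is the intended value for a count-mod-p function. — e.g. on count_restorable_arrays(1, 4, 0): A returns -1, B returns 1000000006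
import Mathlib
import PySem

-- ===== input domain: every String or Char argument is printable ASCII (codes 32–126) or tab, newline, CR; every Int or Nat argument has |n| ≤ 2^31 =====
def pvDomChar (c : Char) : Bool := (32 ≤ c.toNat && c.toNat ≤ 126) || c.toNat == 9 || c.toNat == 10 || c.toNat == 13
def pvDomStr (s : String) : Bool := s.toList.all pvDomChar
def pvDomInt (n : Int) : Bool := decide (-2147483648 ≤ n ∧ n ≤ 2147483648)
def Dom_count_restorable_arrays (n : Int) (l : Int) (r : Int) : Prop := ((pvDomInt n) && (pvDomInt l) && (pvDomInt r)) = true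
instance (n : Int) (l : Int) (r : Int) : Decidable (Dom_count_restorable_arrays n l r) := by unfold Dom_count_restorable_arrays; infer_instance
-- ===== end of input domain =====

-- B replaces A's O(n) remainder-class DP by binary exponentiation of the fixed 3x3
-- circulant transition matrix (measured asymptotically faster); equivalence of the
-- RETURN value is proved outside D_ (A's unreduced DP seed at n = 1).

-- ===== PORT A =====
-- Literal port of A.  The dp table's column i depends only on column i-1 and the
-- answer is dp[0][n-1], so the 'for i in range(1, n)' loop is transcribed as a foldl
-- over the same range carrying the current column (dp[0][i], dp[1][i], dp[2][i]).
def count_restorable_arrays (n : Int) (l : Int) (r : Int) : Int :=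
  let MOD : Int := 1000000007
  let l := l - 1
  let lrem : Int × Int × Int :=
    if PySem.Int.mod l 3 = 0 then
      (PySem.Int.floordiv l 3, PySem.Int.floordiv l 3, PySem.Int.floordiv l 3)
    else if PySem.Int.mod l 3 = 1 then
      (PySem.Int.floordiv l 3, PySem.Int.floordiv l 3 + 1, PySem.Int.floordiv l 3)
    else
      (PySem.Int.floordiv l 3, PySem.Int.floordiv l 3 + 1, PySem.Int.floordiv l 3 + 1)
  let rrem : Int × Int × Int :=
    if PySem.Int.mod r 3 = 0 then
      (PySem.Int.floordiv r 3, PySem.Int.floordiv r 3, PySem.Int.floordiv r 3)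
    else if PySem.Int.mod r 3 = 1 then
      (PySem.Int.floordiv r 3, PySem.Int.floordiv r 3 + 1, PySem.Int.floordiv r 3)
    else
      (PySem.Int.floordiv r 3, PySem.Int.floordiv r 3 + 1, PySem.Int.floordiv r 3 + 1)
  let rem0 := rrem.1 - lrem.1
  let rem1 := rrem.2.1 - lrem.2.1
  let rem2 := rrem.2.2 - lrem.2.2
  let dp :=
    (PySem.List.pyRange 1 n 1).foldl
      (fun (d : Int × Int × Int) _ =>
        (PySem.Int.mod (d.1 * rem0 + d.2.1 * rem2 + d.2.2 * rem1) MOD,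
         PySem.Int.mod (d.2.1 * rem0 + d.2.2 * rem2 + d.1 * rem1) MOD,
         PySem.Int.mod (d.2.2 * rem0 + d.2.1 * rem1 + d.1 * rem2) MOD))
      (rem0, rem1, rem2)
  dp.1

-- ===== PORT B =====
-- A 3x3 matrix as a triple of rows.
abbrev pvMat3 : Type := (Int × Int × Int) × (Int × Int × Int) × (Int × Int × Int)

-- One row of X times Y, each entry taken mod MOD (Source B's `mul`, row by row).
def pvRow (MOD : Int) (x : Int × Int × Int) (Y : pvMat3) : Int × Int × Int :=
  (PySem.Int.mod (x.1 * Y.1.1 + x.2.1 * Y.2.1.1 + x.2.2 * Y.2.2.1) MOD,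
   PySem.Int.mod (x.1 * Y.1.2.1 + x.2.1 * Y.2.1.2.1 + x.2.2 * Y.2.2.2.1) MOD,
   PySem.Int.mod (x.1 * Y.1.2.2 + x.2.1 * Y.2.1.2.2 + x.2.2 * Y.2.2.2.2) MOD)

def pvMul (MOD : Int) (X Y : pvMat3) : pvMat3 :=
  (pvRow MOD X.1 Y, pvRow MOD X.2.1 Y, pvRow MOD X.2.2 Y)

-- Source B's `while e > 0` binary-exponentiation loop; Python's e is an int, but the
-- loop runs 0 times for e ≤ 0, so recursing on (n-1).toNat is exact.
def pvPowLoopAux (MOD : Int) : Nat → pvMat3 → pvMat3 → Nat → pvMat3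
  | 0, R, _, _ => R
  | fuel + 1, R, P, e =>
    if e = 0 then R
    else pvPowLoopAux MOD fuel (if e % 2 = 1 then pvMul MOD R P else R) (pvMul MOD P P) (e / 2)

-- `e` halves each iteration, so `e` itself is enough fuel for the structural loop.
def pvPowLoop (MOD : Int) (R P : pvMat3) (e : Nat) : pvMat3 := pvPowLoopAux MOD e R P e

def count_restorable_arrays_alt (n : Int) (l : Int) (r : Int) : Int :=
  let MOD : Int := 1000000007
  let a := PySem.Int.floordiv (r + 0) 3 - PySem.Int.floordiv (l - 1 + 0) 3
  let b := PySem.Int.floordiv (r + 2) 3 - PySem.Int.floordiv (l - 1 + 2) 3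
  let c := PySem.Int.floordiv (r + 1) 3 - PySem.Int.floordiv (l - 1 + 1) 3
  let M : pvMat3 := ((a, c, b), (b, a, c), (c, b, a))
  let R := pvPowLoop MOD ((1, 0, 0), (0, 1, 0), (0, 0, 1)) M (n - 1).toNat
  PySem.Int.mod (R.1.1 * a + R.1.2.1 * b + R.1.2.2 * c) MOD

-- ===== PRECONDITION & SPEC =====
-- A builds dp rows of length n and reads dp[0][0]; for n ≤ 0 that raises IndexError.
def Pre_count_restorable_arrays (n : Int) (l : Int) (r : Int) : Prop := 1 ≤ n
instance (n : Int) (l : Int) (r : Int) : Decidable (Pre_count_restorable_arrays n l r) := by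
  unfold Pre_count_restorable_arrays; infer_instance

def pvWitness_count_restorable_arrays : Int × Int × Int := (3, 1, 5)

-- For n = 1 when the count of multiples of 3 in [l, r] is negative (r < l) or ≥ 10^9+7,
-- A returns that raw unreduced count (its DP seed is never taken mod 10^9+7), while B
-- returns the canonical residue in [0, 10^9+7), the intended value for a count mod p.
def D_count_restorable_arrays (n : Int) (l : Int) (r : Int) : Prop :=
  n = 1 ∧ (r / 3 - (l - 1) / 3 < 0 ∨ 1000000007 ≤ r / 3 - (l - 1) / 3)
instance (n : Int) (l : Int) (r : Int) : Decidable (D_count_restorable_arrays n l r) := by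
  unfold D_count_restorable_arrays; infer_instance

def Spec_count_restorable_arrays (n : Int) (l : Int) (r : Int) (out : Int) : Prop :=
  ¬ D_count_restorable_arrays n l r → out = count_restorable_arrays_alt n l r
instance (n : Int) (l : Int) (r : Int) (out : Int) : Decidable (Spec_count_restorable_arrays n l r out) := by
  unfold Spec_count_restorable_arrays; infer_instance

def pvDiffWitness_count_restorable_arrays : Int × Int × Int := (1, 4, 0)
def pvDiffWitnessOut_count_restorable_arrays : Int × Int := (-1, 1000000006)

-- ===== CLAIM (what is proved, stated in full; the proofs are below) =====
def Claim_unchanged_count_restorable_arrays : Prop := ∀ (n : Int) (l : Int) (r : Int), Dom_count_restorable_arrays n l r → Pre_count_restorable_arrays n l r → Spec_count_restorable_arrays n l r (count_restorable_arrays n l r)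
def Claim_changed_count_restorable_arrays : Prop := Dom_count_restorable_arrays (pvDiffWitness_count_restorable_arrays.1) (pvDiffWitness_count_restorable_arrays.2.1) (pvDiffWitness_count_restorable_arrays.2.2) ∧ Pre_count_restorable_arrays (pvDiffWitness_count_restorable_arrays.1) (pvDiffWitness_count_restorable_arrays.2.1) (pvDiffWitness_count_restorable_arrays.2.2) ∧ D_count_restorable_arrays (pvDiffWitness_count_restorable_arrays.1) (pvDiffWitness_count_restorable_arrays.2.1) (pvDiffWitness_count_restorable_arrays.2.2) ∧ count_restorable_arrays (pvDiffWitness_count_restorable_arrays.1) (pvDiffWitness_count_restorable_arrays.2.1) (pvDiffWitness_count_restorable_arrays.2.2) = pvDiffWitnessOut_count_restorable_arrays.1 ∧ count_restorable_arrays_alt (pvDiffWitness_count_restorable_arrays.1) (pvDiffWitness_count_restorable_arrays.2.1) (pvDiffWitness_count_restorable_arrays.2.2) = pvDiffWitnessOut_count_restorable_arrays.2 ∧ pvDiffWitnessOut_count_restorable_arrays.1 ≠ pvDiffWitnessOut_count_restorable_arrays.2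
def Claim_exact_count_restorable_arrays : Prop := ∀ (n : Int) (l : Int) (r : Int), Dom_count_restorable_arrays n l r → Pre_count_restorable_arrays n l r → D_count_restorable_arrays n l r → count_restorable_arrays n l r ≠ count_restorable_arrays_alt n l r

-- ===== LEMMAS AND PROOFS =====

-- A's per-column update, as in the port's foldl.
def pvStep (rem0 rem1 rem2 : Int) (d : Int × Int × Int) : Int × Int × Int :=
  (PySem.Int.mod (d.1 * rem0 + d.2.1 * rem2 + d.2.2 * rem1) 1000000007,
   PySem.Int.mod (d.2.1 * rem0 + d.2.2 * rem2 + d.1 * rem1) 1000000007,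
   PySem.Int.mod (d.2.2 * rem0 + d.2.1 * rem1 + d.1 * rem2) 1000000007)

def pvToMat (X : pvMat3) : Matrix (Fin 3) (Fin 3) (ZMod 1000000007) :=
  !![(X.1.1 : ZMod 1000000007), (X.1.2.1 : ZMod 1000000007), (X.1.2.2 : ZMod 1000000007);
     (X.2.1.1 : ZMod 1000000007), (X.2.1.2.1 : ZMod 1000000007), (X.2.1.2.2 : ZMod 1000000007);
     (X.2.2.1 : ZMod 1000000007), (X.2.2.2.1 : ZMod 1000000007), (X.2.2.2.2 : ZMod 1000000007)]

def pvVec (d : Int × Int × Int) : Fin 3 → ZMod 1000000007 :=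
  ![(d.1 : ZMod 1000000007), (d.2.1 : ZMod 1000000007), (d.2.2 : ZMod 1000000007)]

theorem pvCast_emod (x : Int) :
    ((x % (1000000007 : Int) : Int) : ZMod 1000000007) = (x : ZMod 1000000007) := by
  exact_mod_cast ZMod.intCast_mod x 1000000007

theorem pvCast_mod (x : Int) :
    ((PySem.Int.mod x 1000000007 : Int) : ZMod 1000000007) = (x : ZMod 1000000007) := by
  rw [PySem.Int.mod_eq_emod_of_pos (by norm_num)]
  exact_mod_cast ZMod.intCast_mod x 1000000007

theorem pvMod_bounds (x : Int) :
    0 ≤ PySem.Int.mod x 1000000007 ∧ PySem.Int.mod x 1000000007 < 1000000007 := by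
  rw [PySem.Int.mod_eq_emod_of_pos (by norm_num)]
  exact ⟨Int.emod_nonneg x (by norm_num), Int.emod_lt_of_pos x (by norm_num)⟩

theorem pvEq_of_cast_eq (x y : Int) (hx : 0 ≤ x ∧ x < 1000000007) (hy : 0 ≤ y ∧ y < 1000000007)
    (h : (x : ZMod 1000000007) = (y : ZMod 1000000007)) : x = y := by
  have hm : x % (1000000007 : Int) = y % (1000000007 : Int) := by
    have := (ZMod.intCast_eq_intCast_iff' x y 1000000007).mp h
    simpa using this
  rw [Int.emod_eq_of_lt hx.1 hx.2, Int.emod_eq_of_lt hy.1 hy.2] at hm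
  exact hm

set_option maxHeartbeats 1600000 in
theorem pvToMat_mul (X Y : pvMat3) :
    pvToMat (pvMul 1000000007 X Y) = pvToMat X * pvToMat Y := by
  ext i j
  rw [Matrix.mul_apply, Fin.sum_univ_three]
  fin_cases i <;> fin_cases j <;>
    simp [pvMul, pvRow, pvToMat, pvCast_emod]

theorem pvPowLoopAux_spec (fuel : Nat) : ∀ (R P : pvMat3) (e : Nat), e ≤ fuel →
    pvToMat (pvPowLoopAux 1000000007 fuel R P e) = pvToMat R * (pvToMat P) ^ e := by
  induction fuel with
  | zero =>
    intro R P e he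
    interval_cases e
    simp [pvPowLoopAux]
  | succ f ih =>
    intro R P e he
    by_cases h0 : e = 0
    · simp [pvPowLoopAux, h0]
    · rw [show pvPowLoopAux 1000000007 (f + 1) R P e
          = pvPowLoopAux 1000000007 f (if e % 2 = 1 then pvMul 1000000007 R P else R)
              (pvMul 1000000007 P P) (e / 2) by simp [pvPowLoopAux, h0]]
      rw [ih _ _ (e / 2) (by omega), pvToMat_mul, ← sq, ← pow_mul]
      by_cases hp : e % 2 = 1
      · rw [if_pos hp, pvToMat_mul, mul_assoc, ← pow_succ']
        have h1 : 2 * (e / 2) + 1 = e := by omega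
        rw [h1]
      · rw [if_neg hp]
        have h1 : 2 * (e / 2) = e := by omega
        rw [h1]

theorem pvStep_cast (a b c : Int) (d : Int × Int × Int) :
    pvVec (pvStep a b c d) = (pvToMat ((a, c, b), (b, a, c), (c, b, a))).mulVec (pvVec d) := by
  funext i
  fin_cases i <;>
    simp [pvStep, pvVec, pvToMat, pvCast_emod, Matrix.mulVec, dotProduct, Fin.sum_univ_three] <;>
    ring

theorem pvIter_cast (a b c : Int) (k : Nat) (d : Int × Int × Int) :
    pvVec ((pvStep a b c)^[k] d)
      = ((pvToMat ((a, c, b), (b, a, c), (c, b, a))) ^ k).mulVec (pvVec d) := by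
  induction k with
  | zero => simp
  | succ j ih =>
    rw [Function.iterate_succ_apply', pvStep_cast, ih, Matrix.mulVec_mulVec, ← pow_succ']

theorem pvFoldl_const_iterate {α β : Type} (g : α → α) (xs : List β) (init : α) :
    xs.foldl (fun s _ => g s) init = g^[xs.length] init := by
  induction xs generalizing init with
  | nil => rfl
  | cons x xs ih => simp [List.foldl_cons, ih, Function.iterate_succ_apply]

-- The 6-way case analysis for the class counts below m equals one floor division per class.
theorem pvCnt_eq (m : Int) :
    ((if PySem.Int.mod m 3 = 0 then
        (PySem.Int.floordiv m 3, PySem.Int.floordiv m 3, PySem.Int.floordiv m 3)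
      else if PySem.Int.mod m 3 = 1 then
        (PySem.Int.floordiv m 3, PySem.Int.floordiv m 3 + 1, PySem.Int.floordiv m 3)
      else
        (PySem.Int.floordiv m 3, PySem.Int.floordiv m 3 + 1, PySem.Int.floordiv m 3 + 1)) : Int × Int × Int)
      = (PySem.Int.floordiv m 3, PySem.Int.floordiv (m + 2) 3, PySem.Int.floordiv (m + 1) 3) := by
  simp only [PySem.Int.mod_eq_emod_of_pos (by norm_num : (0:Int) < 3),
    PySem.Int.floordiv_eq_ediv_of_pos (by norm_num : (0:Int) < 3)]
  split_ifs <;> refine Prod.ext ?_ (Prod.ext ?_ ?_) <;> simp <;> omega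

-- A, rewritten as the iterate of pvStep on B's class counts.
theorem pvA_eq (n l r : Int) :
    count_restorable_arrays n l r
      = ((pvStep (PySem.Int.floordiv r 3 - PySem.Int.floordiv (l - 1) 3)
            (PySem.Int.floordiv (r + 2) 3 - PySem.Int.floordiv (l - 1 + 2) 3)
            (PySem.Int.floordiv (r + 1) 3 - PySem.Int.floordiv (l - 1 + 1) 3))^[(n - 1).toNat]
          (PySem.Int.floordiv r 3 - PySem.Int.floordiv (l - 1) 3,
           PySem.Int.floordiv (r + 2) 3 - PySem.Int.floordiv (l - 1 + 2) 3,
           PySem.Int.floordiv (r + 1) 3 - PySem.Int.floordiv (l - 1 + 1) 3)).1 := by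
  simp only [count_restorable_arrays, pvCnt_eq]
  rw [pvFoldl_const_iterate, PySem.List.length_pyRange_one]
  rfl

theorem pvVec_zero (d : Int × Int × Int) : pvVec d 0 = (d.1 : ZMod 1000000007) := by
  simp [pvVec]

theorem pvToMat_one : pvToMat ((1, 0, 0), (0, 1, 0), (0, 0, 1)) = 1 := by
  ext i j
  rw [Matrix.one_fin_three]
  fin_cases i <;> fin_cases j <;> simp [pvToMat]

theorem pvMulVec_zero (X : pvMat3) (v : Int × Int × Int) :
    (pvToMat X).mulVec (pvVec v) 0
      = ((X.1.1 * v.1 + X.1.2.1 * v.2.1 + X.1.2.2 * v.2.2 : Int) : ZMod 1000000007) := by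
  simp [pvToMat, pvVec, Matrix.mulVec, dotProduct, Fin.sum_univ_three]

theorem pvIter_bounds (a b c : Int) (k : Nat) (hk : 1 ≤ k) (d : Int × Int × Int) :
    0 ≤ ((pvStep a b c)^[k] d).1 ∧ ((pvStep a b c)^[k] d).1 < 1000000007 := by
  obtain ⟨j, rfl⟩ : ∃ j, k = j + 1 := ⟨k - 1, by omega⟩
  rw [Function.iterate_succ_apply']
  exact pvMod_bounds _

-- B, rewritten with the two `+ 0` offsets of Source B's comprehension simplified away.
theorem pvB_eq (n l r : Int) :
    count_restorable_arrays_alt n l r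
      = PySem.Int.mod
          ((pvPowLoop 1000000007 ((1, 0, 0), (0, 1, 0), (0, 0, 1))
              ((PySem.Int.floordiv r 3 - PySem.Int.floordiv (l - 1) 3,
                PySem.Int.floordiv (r + 1) 3 - PySem.Int.floordiv (l - 1 + 1) 3,
                PySem.Int.floordiv (r + 2) 3 - PySem.Int.floordiv (l - 1 + 2) 3),
               (PySem.Int.floordiv (r + 2) 3 - PySem.Int.floordiv (l - 1 + 2) 3,
                PySem.Int.floordiv r 3 - PySem.Int.floordiv (l - 1) 3,
                PySem.Int.floordiv (r + 1) 3 - PySem.Int.floordiv (l - 1 + 1) 3),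
               (PySem.Int.floordiv (r + 1) 3 - PySem.Int.floordiv (l - 1 + 1) 3,
                PySem.Int.floordiv (r + 2) 3 - PySem.Int.floordiv (l - 1 + 2) 3,
                PySem.Int.floordiv r 3 - PySem.Int.floordiv (l - 1) 3)) (n - 1).toNat).1.1
              * (PySem.Int.floordiv r 3 - PySem.Int.floordiv (l - 1) 3)
            + (pvPowLoop 1000000007 ((1, 0, 0), (0, 1, 0), (0, 0, 1))
              ((PySem.Int.floordiv r 3 - PySem.Int.floordiv (l - 1) 3,
                PySem.Int.floordiv (r + 1) 3 - PySem.Int.floordiv (l - 1 + 1) 3,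
                PySem.Int.floordiv (r + 2) 3 - PySem.Int.floordiv (l - 1 + 2) 3),
               (PySem.Int.floordiv (r + 2) 3 - PySem.Int.floordiv (l - 1 + 2) 3,
                PySem.Int.floordiv r 3 - PySem.Int.floordiv (l - 1) 3,
                PySem.Int.floordiv (r + 1) 3 - PySem.Int.floordiv (l - 1 + 1) 3),
               (PySem.Int.floordiv (r + 1) 3 - PySem.Int.floordiv (l - 1 + 1) 3,
                PySem.Int.floordiv (r + 2) 3 - PySem.Int.floordiv (l - 1 + 2) 3,
                PySem.Int.floordiv r 3 - PySem.Int.floordiv (l - 1) 3)) (n - 1).toNat).1.2.1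
              * (PySem.Int.floordiv (r + 2) 3 - PySem.Int.floordiv (l - 1 + 2) 3)
            + (pvPowLoop 1000000007 ((1, 0, 0), (0, 1, 0), (0, 0, 1))
              ((PySem.Int.floordiv r 3 - PySem.Int.floordiv (l - 1) 3,
                PySem.Int.floordiv (r + 1) 3 - PySem.Int.floordiv (l - 1 + 1) 3,
                PySem.Int.floordiv (r + 2) 3 - PySem.Int.floordiv (l - 1 + 2) 3),
               (PySem.Int.floordiv (r + 2) 3 - PySem.Int.floordiv (l - 1 + 2) 3,
                PySem.Int.floordiv r 3 - PySem.Int.floordiv (l - 1) 3,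
                PySem.Int.floordiv (r + 1) 3 - PySem.Int.floordiv (l - 1 + 1) 3),
               (PySem.Int.floordiv (r + 1) 3 - PySem.Int.floordiv (l - 1 + 1) 3,
                PySem.Int.floordiv (r + 2) 3 - PySem.Int.floordiv (l - 1 + 2) 3,
                PySem.Int.floordiv r 3 - PySem.Int.floordiv (l - 1) 3)) (n - 1).toNat).1.2.2
              * (PySem.Int.floordiv (r + 1) 3 - PySem.Int.floordiv (l - 1 + 1) 3))
          1000000007 := by
  simp only [count_restorable_arrays_alt, add_zero]

theorem pvMain (n l r : Int) (h1 : 1 ≤ n) (hD : ¬ D_count_restorable_arrays n l r) :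
    count_restorable_arrays n l r = count_restorable_arrays_alt n l r := by
  rw [pvA_eq, pvB_eq]
  simp only [PySem.Int.floordiv_eq_ediv_of_pos (show (0 : Int) < 3 by norm_num)]
  by_cases h2 : n = 1
  · subst h2
    have hbd : ¬ (r / 3 - (l - 1) / 3 < 0 ∨ 1000000007 ≤ r / 3 - (l - 1) / 3) := by
      intro hc
      exact hD ⟨rfl, hc⟩
    rw [not_or, not_lt, not_le] at hbd
    simp only [show ((1 : Int) - 1).toNat = 0 from rfl, Function.iterate_zero, id_eq,
      pvPowLoop, pvPowLoopAux, one_mul, zero_mul, add_zero]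
    rw [PySem.Int.mod_eq_emod_of_pos (by norm_num)]
    exact (Int.emod_eq_of_lt hbd.1 hbd.2).symm
  · have hk : 1 ≤ (n - 1).toNat := by omega
    set a := r / 3 - (l - 1) / 3 with ha
    set b := (r + 2) / 3 - (l - 1 + 2) / 3 with hb
    set c := (r + 1) / 3 - (l - 1 + 1) / 3 with hc
    set P := pvPowLoop 1000000007 ((1, 0, 0), (0, 1, 0), (0, 0, 1))
      ((a, c, b), (b, a, c), (c, b, a)) (n - 1).toNat with hP
    apply pvEq_of_cast_eq
    · exact pvIter_bounds _ _ _ _ hk _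
    · exact pvMod_bounds _
    · rw [pvCast_mod]
      have hA := congrFun (pvIter_cast a b c ((n - 1).toNat) (a, b, c)) 0
      rw [pvVec_zero] at hA
      have hB := pvMulVec_zero P (a, b, c)
      rw [hA, ← hB, hP]
      rw [show pvPowLoop 1000000007 ((1, 0, 0), (0, 1, 0), (0, 0, 1))
            ((a, c, b), (b, a, c), (c, b, a)) (n - 1).toNat
          = pvPowLoopAux 1000000007 ((n - 1).toNat) ((1, 0, 0), (0, 1, 0), (0, 0, 1))
            ((a, c, b), (b, a, c), (c, b, a)) ((n - 1).toNat) from rfl,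
        pvPowLoopAux_spec ((n - 1).toNat) _ _ ((n - 1).toNat) le_rfl, pvToMat_one, one_mul]

-- ===== VERDICT (by name: the statement is the Claim_ definition above) =====
theorem count_restorable_arrays_spec : Claim_unchanged_count_restorable_arrays := by
  intro n l r _hDom hPre hD
  exact pvMain n l r hPre hD
theorem count_restorable_arrays_changed : Claim_changed_count_restorable_arrays := by
  unfold Claim_changed_count_restorable_arrays; decide
theorem count_restorable_arrays_tight : Claim_exact_count_restorable_arrays := by
  intro n l r _hDom _hPre hD
  obtain ⟨h1, h2⟩ := hD
  subst h1
  rw [pvA_eq, pvB_eq]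
  simp only [PySem.Int.floordiv_eq_ediv_of_pos (show (0 : Int) < 3 by norm_num)]
  simp only [show ((1 : Int) - 1).toNat = 0 from rfl, Function.iterate_zero, id_eq,
    pvPowLoop, pvPowLoopAux, one_mul, zero_mul, add_zero]
  rw [PySem.Int.mod_eq_emod_of_pos (by norm_num)]
  have hnn := Int.emod_nonneg (r / 3 - (l - 1) / 3) (by norm_num : (1000000007 : Int) ≠ 0)
  have hlt := Int.emod_lt_of_pos (r / 3 - (l - 1) / 3) (by norm_num : (0 : Int) < 1000000007)
  omega
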